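-- pv_equiv track=rewrite | github.com/Dreagonmon/micropython-toolkit | http_utils/coding.py | u8len
-- ===== SOURCE A (Python) =====
-- def u8len(first_byte):
--     pat = 0x01 << 7 # 1000000
--     byt = first_byte # first byte
--     l = 0 # length
--     while byt & pat != 0:
--         l = l + 1
--         pat = pat >> 1
--     if l == 0:
--         l = 1 # for ascii
--     return l
-- ===== SOURCE B (Python) =====
-- def u8len(first_byte):
--     b = first_byte & 0xFF
--     if b < 0xC0:
--         return 1
--     elif b < 0xE0:
--         return 2
--     elif b < 0xF0:
--         return 3
--     elif b < 0xF8: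
--         return 4
--     elif b < 0xFC:
--         return 5
--     elif b < 0xFE:
--         return 6
--     elif b < 0xFF:
--         return 7
--     else:
--         return 8
-- ===== Notes on version B (the rewrite author's own statement) =====
-- stated objective: idiomatic
-- what changed: Replaces the bit-shifting leading-ones loop with a single mask of the low byte followed by a flat threshold chain (the standard UTF-8 lead-byte length idiom).
import Mathlib
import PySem

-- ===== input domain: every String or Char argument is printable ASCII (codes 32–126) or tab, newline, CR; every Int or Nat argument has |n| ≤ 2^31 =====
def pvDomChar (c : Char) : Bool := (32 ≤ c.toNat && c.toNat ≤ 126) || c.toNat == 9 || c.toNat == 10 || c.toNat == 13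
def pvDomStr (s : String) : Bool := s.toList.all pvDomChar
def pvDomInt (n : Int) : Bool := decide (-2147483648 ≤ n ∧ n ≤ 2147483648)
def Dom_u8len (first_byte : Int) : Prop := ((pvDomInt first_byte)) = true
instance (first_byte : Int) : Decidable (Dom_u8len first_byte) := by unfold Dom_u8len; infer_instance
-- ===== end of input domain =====

-- B replaces A's bit-shifting leading-ones loop with one low-byte mask and a flat
-- threshold chain (the standard UTF-8 lead-byte length idiom); objective: idiomatic.

-- ===== PORT A =====
-- while byt & pat != 0: l += 1; pat >>= 1   — the fuel 9 only makes the loop total: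
-- pat starts at 1 << 7 = 128 and halves each step, so the loop runs at most 8 times.
def u8lenLoop : Nat → Int → Int → Int → Int
  | 0, _, _, l => l
  | fuel + 1, byt, pat, l =>
      if PySem.Int.band byt pat ≠ 0 then u8lenLoop fuel byt (pat >>> (1 : Nat)) (l + 1) else l

def u8len (first_byte : Int) : Int :=
  let l := u8lenLoop 9 first_byte ((1 : Int) <<< 7) 0
  if l = 0 then 1 else l

-- ===== PORT B =====
def u8len_alt (first_byte : Int) : Int :=
  let b := PySem.Int.band first_byte 0xFF
  if b < 0xC0 then 1
  else if b < 0xE0 then 2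
  else if b < 0xF0 then 3
  else if b < 0xF8 then 4
  else if b < 0xFC then 5
  else if b < 0xFE then 6
  else if b < 0xFF then 7
  else 8

-- ===== PRECONDITION & SPEC =====
def Spec_u8len (first_byte : Int) (out : Int) : Prop := out = u8len_alt first_byte
instance (first_byte : Int) (out : Int) : Decidable (Spec_u8len first_byte out) := by unfold Spec_u8len; infer_instance

-- ===== CLAIM (what is proved, stated in full; the proofs are below) =====
def Claim_equal_u8len : Prop := ∀ (first_byte : Int), Dom_u8len first_byte → Spec_u8len first_byte (u8len first_byte)

-- ===== LEMMAS AND PROOFS =====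

-- x &&& 2^k over Nat, in div/mod form
theorem nat_and_pow (x : Nat) (k : Nat) : x &&& 2 ^ k = x / 2 ^ k % 2 * 2 ^ k := by
  rw [Nat.and_two_pow, Nat.testBit_eq_decide_div_mod_eq]
  rcases Nat.mod_two_eq_zero_or_one (x / 2 ^ k) with h | h <;> simp [h]

-- PySem band on a negative left argument, unfolded
theorem band_neg (a b : Int) (ha : a < 0) (hb : 0 ≤ b) :
    PySem.Int.band a b = ((b.toNat - (b.toNat &&& (-a - 1).toNat) : Nat) : Int) := by
  rw [PySem.Int.band, if_neg (by omega), if_pos hb]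

-- band with a power-of-two mask below 256 only sees the argument's low byte
theorem band_pow_eq_emod (a : Int) (k : Nat) (hk : k < 8) :
    PySem.Int.band a (2 ^ k) = a % 256 / 2 ^ k % 2 * 2 ^ k := by
  have hcast : ((2 : Int) ^ k) = ((2 ^ k : Nat) : Int) := by push_cast; ring
  rcases lt_or_ge a 0 with ha | ha
  · rw [band_neg a _ ha (by positivity), hcast, Int.toNat_natCast, Nat.and_comm, nat_and_pow]
    interval_cases k <;> omega
  · obtain ⟨x, rfl⟩ := Int.eq_ofNat_of_zero_le ha
    rw [hcast, PySem.Int.band_natCast, nat_and_pow]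
    interval_cases k <;> omega

-- band with mask 255 is the value mod 256
theorem band_255_eq_emod (a : Int) : PySem.Int.band a 255 = a % 256 := by
  rcases lt_or_ge a 0 with ha | ha
  · rw [band_neg a 255 ha (by norm_num), show ((255 : Int).toNat) = 255 from rfl, Nat.and_comm]
    have := Nat.and_two_pow_sub_one_eq_mod (-a - 1).toNat 8
    rw [show (2:Nat)^8 - 1 = 255 from by norm_num, show (2:Nat)^8 = 256 from by norm_num] at this
    rw [this]
    omega
  · obtain ⟨x, rfl⟩ := Int.eq_ofNat_of_zero_le ha
    rw [show ((255 : Int)) = ((255 : Nat) : Int) from rfl, PySem.Int.band_natCast]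
    have := Nat.and_two_pow_sub_one_eq_mod x 8
    rw [show (2:Nat)^8 - 1 = 255 from by norm_num, show (2:Nat)^8 = 256 from by norm_num] at this
    rw [this]
    omega

-- the loop ends as soon as pat reaches 0
theorem loop_zero (fuel : Nat) (a l : Int) : u8lenLoop fuel a 0 l = l := by
  cases fuel <;> simp [u8lenLoop, PySem.Int.band_zero]

-- the loop's band tests only inspect the low byte, since every pat is 2^k, k < 8
theorem loop_congr (a b : Int)
    (hab : ∀ k : Nat, k < 8 → PySem.Int.band a (2 ^ k) = PySem.Int.band b (2 ^ k)) :
    ∀ (fuel : Nat) (k : Nat), k < 8 → ∀ l : Int,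
      u8lenLoop fuel a (2 ^ k) l = u8lenLoop fuel b (2 ^ k) l := by
  intro fuel
  induction fuel with
  | zero => intro k _ l; simp [u8lenLoop]
  | succ n ih =>
    intro k hk l
    simp only [u8lenLoop, hab k hk]
    cases k with
    | zero =>
      have h0 : ((2 : Int) ^ 0) >>> (1 : Nat) = 0 := by decide
      rw [h0]
      split_ifs <;> simp [loop_zero]
    | succ j =>
      have hsh : ((2 : Int) ^ (j + 1)) >>> (1 : Nat) = 2 ^ j := by
        rw [Int.shiftRight_eq_div_pow, pow_succ]
        norm_num
      rw [hsh]
      split_ifs with h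
      · exact ih j (by omega) (l + 1)
      · rfl

-- port A depends only on the argument's value mod 256
theorem u8len_emod (a : Int) : u8len a = u8len (a % 256) := by
  have hab : ∀ k : Nat, k < 8 →
      PySem.Int.band a (2 ^ k) = PySem.Int.band (a % 256) (2 ^ k) := by
    intro k hk
    rw [band_pow_eq_emod a k hk, band_pow_eq_emod (a % 256) k hk]
    have : a % 256 % 256 = a % 256 := by omega
    rw [this]
  have h7 : ((1 : Int) <<< 7) = 2 ^ 7 := by decide
  simp only [u8len, h7]
  rw [loop_congr a (a % 256) hab 9 7 (by omega) 0]

-- port B depends only on the argument's value mod 256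
theorem u8len_alt_emod (a : Int) : u8len_alt a = u8len_alt (a % 256) := by
  simp only [u8len_alt]
  rw [show (0xFF : Int) = 255 from rfl, band_255_eq_emod, band_255_eq_emod]
  have : a % 256 % 256 = a % 256 := by omega
  rw [this]

-- exhaustive check over the 256 possible low-byte values
set_option maxRecDepth 8192 in
theorem all_bytes : ∀ n : Fin 256, u8len (n : Int) = u8len_alt (n : Int) := by decide

-- ===== VERDICT (by name: the statement is the Claim_ definition above) =====
theorem u8len_spec : Claim_equal_u8len := by
  intro a _
  unfold Spec_u8len
  rw [u8len_emod, u8len_alt_emod]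
  have h0 : 0 ≤ a % 256 := by omega
  have h1 : a % 256 < 256 := by omega
  have hx : a % 256 = (((a % 256).toNat : Nat) : Int) := by omega
  rw [hx]
  exact all_bytes ⟨(a % 256).toNat, by omega⟩
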